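-- pv_equiv track=rewrite | github.com/Elna-MR/EEG | Self_Elna/Avira_Anti_Virus.py | select_question_monitor
-- ===== SOURCE A (Python) =====
-- def select_question_monitor(monitors):
--     """Always select the extended monitor (1920x1080) for coding problems"""
--     if len(monitors) <= 1:
--         return monitors[0]
--
--     # Always look for the extended monitor (1920x1080)
--     for i, monitor in enumerate(monitors):
--         if monitor['width'] == 1920 and monitor['height'] == 1080:
--             return monitor
--
--     # If extended monitor not found, fallback to highest resolution
--     best_monitor = monitors[0]
--     max_area = monitors[0]['width'] * monitors[0]['height']
--
--     for monitor in monitors[1:]: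
--         area = monitor['width'] * monitor['height']
--         if area > max_area:
--             max_area = area
--             best_monitor = monitor
--
--     return best_monitor
-- ===== SOURCE B (Python) =====
-- def select_question_monitor(monitors):
--     """Single fused pass: return first exact 1920x1080 monitor immediately,
--     otherwise keep a running best-by-area and return it at the end."""
--     if len(monitors) <= 1:
--         return monitors[0]
--     best = monitors[0]
--     max_area = best['width'] * best['height']
--     for m in monitors:
--         w = m['width']
--         h = m['height']
--         if w == 1920 and h == 1080:
--             return m
--         area = w * h
--         if area > max_area:
--             max_area = area
--             best = m
--     return best
-- ===== Notes on version B (the rewrite author's own statement) =====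
-- stated objective: alternative
-- what changed: A's two separate passes (a scan for an exact 1920x1080 match, then a second max-area scan) are fused into one loop that short-circuits on the first exact match while maintaining the running best-by-area.
import Mathlib
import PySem

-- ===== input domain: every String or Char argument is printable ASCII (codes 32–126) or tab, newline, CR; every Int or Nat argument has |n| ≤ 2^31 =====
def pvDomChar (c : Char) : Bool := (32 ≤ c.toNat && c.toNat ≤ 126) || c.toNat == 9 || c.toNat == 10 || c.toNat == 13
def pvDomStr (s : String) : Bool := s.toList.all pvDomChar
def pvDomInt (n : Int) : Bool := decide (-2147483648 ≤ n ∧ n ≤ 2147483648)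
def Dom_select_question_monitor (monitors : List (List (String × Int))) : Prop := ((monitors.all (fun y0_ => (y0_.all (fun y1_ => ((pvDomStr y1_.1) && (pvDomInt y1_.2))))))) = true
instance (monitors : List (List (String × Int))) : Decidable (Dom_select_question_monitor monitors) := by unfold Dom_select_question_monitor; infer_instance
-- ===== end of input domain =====

-- B fuses A's two passes (exact-match scan, then max-area scan) into one short-circuiting
-- pass with a running best; objective: alternative (same O(n) cost, different decomposition).

-- first-match dict lookup (Python d[k]); the 0 default is never reached inside Pre_
def pvLookup (m : List (String × Int)) (k : String) : Int :=
  (((m.find? (fun p => p.1 == k)).map (fun p => p.2)).getD 0)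

-- ===== PORT A =====
-- A's first loop: 'return monitor' on the first exact 1920x1080 match
def pvIsQ (m : List (String × Int)) : Bool :=
  pvLookup m "width" == 1920 && pvLookup m "height" == 1080

-- A's second loop body: keep (best_monitor, max_area), update on strictly greater area
def pvStep (b : List (String × Int) × Int) (m : List (String × Int)) :
    List (String × Int) × Int :=
  let area := pvLookup m "width" * pvLookup m "height"
  if area > b.2 then (m, area) else b

def select_question_monitor (monitors : List (List (String × Int))) : List (String × Int) :=
  if monitors.length ≤ 1 then monitors.headD []   -- monitors[0]; [] case is outside Pre_
  else
    match monitors.find? pvIsQ with               -- the enumerate loop with early return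
    | some m => m
    | none =>
      let first := monitors.headD []
      ((monitors.drop 1).foldl pvStep (first, pvLookup first "width" * pvLookup first "height")).1

-- ===== PORT B =====
-- B's single fused loop: early return on exact match, else running best-by-area
def pvGoB (rest : List (List (String × Int))) (best : List (String × Int)) (maxArea : Int) :
    List (String × Int) :=
  match rest with
  | [] => best
  | m :: tl =>
    if pvLookup m "width" == 1920 && pvLookup m "height" == 1080 then m
    else if pvLookup m "width" * pvLookup m "height" > maxArea then
      pvGoB tl m (pvLookup m "width" * pvLookup m "height")
    else pvGoB tl best maxArea

def select_question_monitor_alt (monitors : List (List (String × Int))) : List (String × Int) :=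
  if monitors.length ≤ 1 then monitors.headD []
  else
    let best := monitors.headD []
    pvGoB monitors best (pvLookup best "width" * pvLookup best "height")

-- ===== PRECONDITION & SPEC =====
-- Pre_ excludes the empty list (A raises IndexError) and, for 2+ monitors, lists where some
-- monitor lacks a 'width' or 'height' key: there A raises KeyError or returns only by
-- short-circuiting past the broken monitor, while B's fused pass raises KeyError.
def Pre_select_question_monitor (monitors : List (List (String × Int))) : Prop :=
  monitors ≠ [] ∧ (1 < monitors.length →
    ∀ m ∈ monitors, (m.find? (fun p => p.1 == "width")).isSome ∧
                    (m.find? (fun p => p.1 == "height")).isSome)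
instance (monitors : List (List (String × Int))) : Decidable (Pre_select_question_monitor monitors) := by
  unfold Pre_select_question_monitor; infer_instance

def pvWitness_select_question_monitor : (List (List (String × Int))) :=
  [[("width", 1920), ("height", 1080)], [("width", 800), ("height", 600)]]

def Spec_select_question_monitor (monitors : List (List (String × Int))) (out : List (String × Int)) : Prop := out = select_question_monitor_alt monitors
instance (monitors : List (List (String × Int))) (out : List (String × Int)) : Decidable (Spec_select_question_monitor monitors out) := by unfold Spec_select_question_monitor; infer_instance

-- ===== CLAIM (what is proved, stated in full; the proofs are below) =====
def Claim_equal_select_question_monitor : Prop := ∀ (monitors : List (List (String × Int))), Dom_select_question_monitor monitors → Pre_select_question_monitor monitors → Spec_select_question_monitor monitors (select_question_monitor monitors)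

-- ===== LEMMAS AND PROOFS =====

-- if the list contains an exact match, the fused pass returns the first one, whatever the accumulator
theorem pvGoB_find_some (l : List (List (String × Int))) :
    ∀ b a m, l.find? pvIsQ = some m → pvGoB l b a = m := by
  induction l with
  | nil => intro b a m h; simp at h
  | cons x tl ih =>
    intro b a m h
    by_cases hx : pvIsQ x = true
    · rw [List.find?_cons_of_pos hx] at h
      injection h with h; subst h
      simp only [pvGoB]
      rw [if_pos (by simpa [pvIsQ] using hx)]
    · rw [List.find?_cons_of_neg hx] at h
      simp only [pvGoB]
      rw [if_neg (by simpa [pvIsQ] using hx)]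
      split
      · exact ih _ _ _ h
      · exact ih _ _ _ h

-- with no exact match the fused pass is exactly A's second loop (a foldl of pvStep)
theorem pvGoB_find_none (l : List (List (String × Int))) :
    ∀ b a, l.find? pvIsQ = none → pvGoB l b a = (l.foldl pvStep (b, a)).1 := by
  induction l with
  | nil => intro b a _; simp [pvGoB]
  | cons x tl ih =>
    intro b a h
    rw [List.find?_eq_none] at h
    have hx : ¬ pvIsQ x = true := h x (by simp)
    have htl : tl.find? pvIsQ = none := List.find?_eq_none.mpr (fun y hy => h y (by simp [hy]))
    simp only [pvGoB, List.foldl_cons]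
    rw [if_neg (by simpa [pvIsQ] using hx)]
    by_cases harea : pvLookup x "width" * pvLookup x "height" > a
    · rw [if_pos harea, ih _ _ htl]
      simp [pvStep, harea]
    · rw [if_neg harea, ih _ _ htl]
      simp [pvStep, harea]

-- ===== VERDICT (by name: the statement is the Claim_ definition above) =====
theorem select_question_monitor_spec : Claim_equal_select_question_monitor := by
  intro monitors _hdom _hpre
  unfold Spec_select_question_monitor
  by_cases hlen : monitors.length ≤ 1
  · simp [select_question_monitor, select_question_monitor_alt, hlen]
  · match monitors with
    | [] => simp at hlen
    | m0 :: tl =>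
      simp only [select_question_monitor, select_question_monitor_alt, if_neg hlen]
      cases hf : (m0 :: tl).find? pvIsQ with
      | some m =>
        exact (pvGoB_find_some _ _ _ _ hf).symm
      | none =>
        rw [pvGoB_find_none _ _ _ hf]
        simp only [List.headD_cons, List.drop_succ_cons, List.drop_zero, List.foldl_cons]
        have hstep : pvStep (m0, pvLookup m0 "width" * pvLookup m0 "height") m0
             = (m0, pvLookup m0 "width" * pvLookup m0 "height") := by
          simp [pvStep]
        rw [hstep]
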